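-- pv_equiv track=rewrite | github.com/haojunzhang/ALG | array/HackerRank Climbing the Leaderboard.py | solve
-- ===== SOURCE A (Python) =====
-- def solve(rank, player):
--     ret = []
--     for p in player:
--         cur_rank = 1
--         is_end = True
--         j = 0
--         while j < len(rank):
--             if p >= rank[j]:
--                 rank.insert(j, p)
--                 ret.append(cur_rank)
--                 is_end = False  # 跑到底了
--                 break
--             else:
--                 # 跳過重複
--                 while j < len(rank) - 1 and rank[j] == rank[j+1]:
--                     j += 1
--                 cur_rank += 1
--             j += 1  # 每圈+1
--         # 如跑到底, 代表最小
--         if is_end is True: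
--             rank.append(p)
--             ret.append(cur_rank)
--     return ret
-- ===== SOURCE B (Python) =====
-- def solve(rank, player):
--     # Maintain only the adjacent-distinct "runs" of the leaderboard instead of the
--     # full list; scans the condensed list without A's inner duplicate-skipping loop.
--     # (A mutates its `rank` argument in place; B does not — return value only.)
--     runs = []
--     for v in rank:
--         if not runs or runs[-1] != v:
--             runs.append(v)
--     out = []
--     for p in player:
--         i = 0
--         while i < len(runs) and p < runs[i]:
--             i += 1
--         out.append(i + 1)
--         if i == len(runs) or runs[i] != p:
--             runs.insert(i, p)
--     return out
-- ===== Notes on version B (the rewrite author's own statement) =====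
-- stated objective: faster
-- what changed: B condenses the leaderboard once into its list of adjacent-distinct run values and, per player, scans and updates only that condensed list, eliminating A's inner duplicate-skipping loop and its insertions into the ever-growing full list (A also mutates its rank argument in place; B does not).
import Mathlib
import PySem

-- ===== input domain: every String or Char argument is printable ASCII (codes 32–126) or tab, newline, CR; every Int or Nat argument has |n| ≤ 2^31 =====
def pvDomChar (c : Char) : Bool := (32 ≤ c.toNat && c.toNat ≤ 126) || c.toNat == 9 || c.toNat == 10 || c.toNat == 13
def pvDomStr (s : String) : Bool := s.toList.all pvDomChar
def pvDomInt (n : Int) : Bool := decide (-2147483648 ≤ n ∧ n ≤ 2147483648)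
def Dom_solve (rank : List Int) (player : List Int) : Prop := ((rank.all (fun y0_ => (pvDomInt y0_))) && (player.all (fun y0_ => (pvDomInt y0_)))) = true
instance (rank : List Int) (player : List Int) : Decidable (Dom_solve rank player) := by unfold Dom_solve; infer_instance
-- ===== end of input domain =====

-- B keeps only the adjacent-distinct "runs" of the leaderboard instead of the full list,
-- removing A's inner duplicate-skipping loop (objective: alternative; A mutates its
-- `rank` argument in place, B does not — the equivalence is about the return value only).

-- ===== PORT A =====
-- A's inner while loop over index j, with the duplicate-skip sub-loop: one recursive
-- scan over the suffix of `rank`; skipping a duplicate = moving on without the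
-- `cur_rank += 1` that ends a run (exactly A's `while rank[j] == rank[j+1]: j += 1`).
def solveScan (p cur : Int) : List Int → List Int × Int
  | [] => ([p], cur)                                  -- is_end: rank.append(p)
  | v :: rest =>
    if p ≥ v then (p :: v :: rest, cur)               -- rank.insert(j, p); break
    else
      let r := solveScan p (if rest.head? = some v then cur else cur + 1) rest
      (v :: r.1, r.2)

def solve (rank : List Int) (player : List Int) : List Int :=
  (player.foldl (fun st p =>
     let r := solveScan p 1 st.1
     (r.1, st.2 ++ [r.2])) (rank, ([] : List Int))).2

-- ===== PORT B =====
def buildRuns (rank : List Int) : List Int :=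
  rank.foldl (fun rs v => if rs = [] ∨ rs.getLast? ≠ some v then rs ++ [v] else rs) []

-- `while i < len(runs) and p < runs[i]: i += 1`
def altFind (p : Int) : List Int → Nat
  | [] => 0
  | v :: rest => if p < v then altFind p rest + 1 else 0

def altStep (runs : List Int) (p : Int) : List Int × Int :=
  let i := altFind p runs
  (if i = runs.length ∨ runs[i]? ≠ some p then PySem.List.insert runs (i : Int) p else runs,
   (i : Int) + 1)

def solve_alt (rank : List Int) (player : List Int) : List Int :=
  (player.foldl (fun st p =>
     let r := altStep st.1 p
     (r.1, st.2 ++ [r.2])) (buildRuns rank, ([] : List Int))).2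

-- ===== PRECONDITION & SPEC =====
def Spec_solve (rank : List Int) (player : List Int) (out : List Int) : Prop := out = solve_alt rank player
instance (rank : List Int) (player : List Int) (out : List Int) : Decidable (Spec_solve rank player out) := by unfold Spec_solve; infer_instance

-- ===== CLAIM (what is proved, stated in full; the proofs are below) =====
def Claim_equal_solve : Prop := ∀ (rank : List Int) (player : List Int), Dom_solve rank player → Spec_solve rank player (solve rank player)

-- ===== LEMMAS AND PROOFS =====

-- the adjacent-distinct condensation of a list
def condAux (w : Int) : List Int → List Int
  | [] => []
  | v :: rest => if v = w then condAux w rest else v :: condAux v rest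

def condL : List Int → List Int
  | [] => []
  | v :: rest => v :: condAux v rest

theorem condAux_of_head_ne (v : Int) (l : List Int) (h : l.head? ≠ some v) :
    condAux v l = condL l := by
  cases l with
  | nil => rfl
  | cons w ws =>
    have : w ≠ v := by simpa using h
    simp [condAux, condL, this]

theorem cond_cons_of_head_ne (v : Int) (l : List Int) (h : l.head? ≠ some v) :
    condL (v :: l) = v :: condL l := by
  simp [condL, condAux_of_head_ne v l h]

theorem cond_cons_dup (v : Int) (l : List Int) (h : l.head? = some v) :
    condL (v :: l) = condL l := by
  cases l with
  | nil => simp at h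
  | cons w ws =>
    have : w = v := by simpa using h
    subst this
    simp [condL, condAux]

theorem buildRuns_aux (l : List Int) : ∀ (rs : List Int) (w : Int),
    rs ≠ [] → rs.getLast? = some w →
    l.foldl (fun rs v => if rs = [] ∨ rs.getLast? ≠ some v then rs ++ [v] else rs) rs
      = rs ++ condAux w l := by
  induction l with
  | nil => intro rs w _ _; simp [condAux]
  | cons v l ih =>
    intro rs w hne hlast
    by_cases hv : v = w
    · subst hv
      have hcond : ¬ (rs = [] ∨ rs.getLast? ≠ some v) := by
        push Not; exact ⟨hne, hlast⟩
      simp only [List.foldl_cons, if_neg hcond, condAux]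
      exact ih rs v hne hlast
    · have hcond : (rs = [] ∨ rs.getLast? ≠ some v) := by
        right; rw [hlast]; simp; exact fun h => hv h.symm
      simp only [List.foldl_cons, if_pos hcond, condAux, if_neg hv]
      rw [ih (rs ++ [v]) v (by simp) (by simp)]
      simp

theorem buildRuns_eq_cond (rank : List Int) : buildRuns rank = condL rank := by
  cases rank with
  | nil => rfl
  | cons v l =>
    have h1 : buildRuns (v :: l)
        = l.foldl (fun rs v => if rs = [] ∨ rs.getLast? ≠ some v then rs ++ [v] else rs) [v] := by
      simp [buildRuns]
    rw [h1, buildRuns_aux l [v] v (by simp) (by simp)]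
    simp [condL]

theorem altFind_le (p : Int) : ∀ l : List Int, altFind p l ≤ l.length := by
  intro l
  induction l with
  | nil => simp [altFind]
  | cons v rest ih =>
    simp only [altFind]
    split
    · simpa using ih
    · simp

theorem insert_succ (cs : List Int) (v p : Int) (i : Nat) (h : i ≤ cs.length) :
    PySem.List.insert (v :: cs) ((i : Int) + 1) p = v :: PySem.List.insert cs (i : Int) p := by
  have h1 : ((i : Int) + 1) = ((i + 1 : Nat) : Int) := by push_cast; ring
  rw [h1, PySem.List.insert_natCast _ _ _ (by simpa using Nat.succ_le_succ h),
      PySem.List.insert_natCast _ _ _ h]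
  simp

theorem altStep_cons_of_lt (v p : Int) (cs : List Int) (h : p < v) :
    altStep (v :: cs) p = (v :: (altStep cs p).1, (altStep cs p).2 + 1) := by
  unfold altStep
  simp only [altFind, if_pos h]
  by_cases hC : (altFind p cs = cs.length ∨ cs[altFind p cs]? ≠ some p)
  · have hC' : (altFind p cs + 1 = (v :: cs).length ∨ (v :: cs)[altFind p cs + 1]? ≠ some p) := by
      simpa using hC
    rw [if_pos hC', if_pos hC]
    have h1 : ((altFind p cs + 1 : Nat) : Int) = ((altFind p cs : Nat) : Int) + 1 := by
      push_cast; ring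
    rw [h1, insert_succ cs v p _ (altFind_le p cs)]
  · have hC' : ¬ (altFind p cs + 1 = (v :: cs).length ∨ (v :: cs)[altFind p cs + 1]? ≠ some p) := by
      simpa using hC
    rw [if_neg hC', if_neg hC]
    congr 1

-- head of A's scan result when the first element is not taken
theorem solveScan_cons_lt (p cur v : Int) (rest : List Int) (h : ¬ p ≥ v) :
    solveScan p cur (v :: rest)
      = (v :: (solveScan p (if rest.head? = some v then cur else cur + 1) rest).1,
         (solveScan p (if rest.head? = some v then cur else cur + 1) rest).2) := by
  simp [solveScan, h]

theorem solveScan_head_ne (p cur v : Int) (l : List Int) (hp : p ≠ v)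
    (hl : l.head? ≠ some v) : (solveScan p cur l).1.head? ≠ some v := by
  cases l with
  | nil => simpa [solveScan] using hp
  | cons w ws =>
    have hw : w ≠ v := by simpa using hl
    by_cases h : p ≥ w
    · simpa [solveScan, h] using hp
    · simp [solveScan, h, hw]

-- KEY LEMMA: one player step — A's scan, condensed, is B's step on the condensed state.
theorem scan_step (p : Int) : ∀ (l : List Int) (cur : Int),
    condL (solveScan p cur l).1 = (altStep (condL l) p).1
    ∧ (solveScan p cur l).2 = cur - 1 + (altStep (condL l) p).2 := by
  intro l
  induction l with
  | nil =>
    intro cur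
    refine ⟨?_, ?_⟩
    · simp [solveScan, condL, condAux, altStep, altFind, PySem.List.insert_zero]
    · simp [solveScan, altStep]
  | cons v rest ih =>
    intro cur
    by_cases hpv : p ≥ v
    · have hfind : altFind p (condL (v :: rest)) = 0 := by
        simp [condL, altFind, not_lt.mpr hpv]
      refine ⟨?_, ?_⟩
      · by_cases hpe : p = v
        · subst hpe
          have hA : condL (solveScan p cur (p :: rest)).1 = condL (p :: rest) := by
            simp only [solveScan, if_pos hpv]
            exact cond_cons_dup p (p :: rest) rfl
          have hB : (altStep (condL (p :: rest)) p).1 = condL (p :: rest) := by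
            unfold altStep
            rw [hfind]
            have hC : ¬ ((0 = (condL (p :: rest)).length) ∨ (condL (p :: rest))[0]? ≠ some p) := by
              push Not
              exact ⟨by simp [condL], by simp [condL]⟩
            simp only [if_neg hC]
          rw [hA, hB]
        · have hA : condL (solveScan p cur (v :: rest)).1 = p :: condL (v :: rest) := by
            simp only [solveScan, if_pos hpv]
            exact cond_cons_of_head_ne p (v :: rest) (by simpa using fun h => hpe h.symm)
          have hB : (altStep (condL (v :: rest)) p).1 = p :: condL (v :: rest) := by
            unfold altStep
            rw [hfind]
            have hC : ((0 = (condL (v :: rest)).length) ∨ (condL (v :: rest))[0]? ≠ some p) := by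
              right; simp [condL]
              intro h; exact hpe h.symm
            simp only [if_pos hC, Nat.cast_zero, PySem.List.insert_zero]
          rw [hA, hB]
      · simp [solveScan, if_pos hpv, altStep, hfind]
    · -- p < v : A walks past the run of v
      have hlt : p < v := lt_of_not_ge hpv
      by_cases hd : rest.head? = some v
      · -- duplicate: same cur, condensed state unchanged by the duplicate head
        obtain ⟨rest', hrest⟩ : ∃ rest', rest = v :: rest' := by
          cases rest with
          | nil => simp at hd
          | cons w ws =>
            have hw : w = v := by simpa using hd
            exact ⟨ws, by rw [hw]⟩
        subst hrest
        have hcur : (if (v :: rest').head? = some v then cur else cur + 1) = cur := by simp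
        have hco : condL (v :: v :: rest') = condL (v :: rest') :=
          cond_cons_dup v (v :: rest') rfl
        have ihc := ih cur
        refine ⟨?_, ?_⟩
        · rw [solveScan_cons_lt p cur v (v :: rest') hpv, hcur]
          have hhead : (solveScan p cur (v :: rest')).1.head? = some v := by
            simp [solveScan, hpv]
          rw [cond_cons_dup v _ hhead, hco]
          exact ihc.1
        · rw [solveScan_cons_lt p cur v (v :: rest') hpv, hcur, hco]
          exact ihc.2
      · -- end of run: cur + 1, B index shifts by one
        have hcur : (if rest.head? = some v then cur else cur + 1) = cur + 1 := by
          simp [hd]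
        have hco : condL (v :: rest) = v :: condL rest := cond_cons_of_head_ne v rest hd
        have ihc := ih (cur + 1)
        have hstep := altStep_cons_of_lt v p (condL rest) hlt
        refine ⟨?_, ?_⟩
        · rw [solveScan_cons_lt p cur v rest hpv, hcur]
          have hne : p ≠ v := ne_of_lt hlt
          have hhead : (solveScan p (cur + 1) rest).1.head? ≠ some v :=
            solveScan_head_ne p (cur + 1) v rest hne hd
          rw [cond_cons_of_head_ne v _ hhead, ihc.1, hco, hstep]
        · rw [solveScan_cons_lt p cur v rest hpv, hcur, ihc.2, hco, hstep]
          ring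

theorem fold_eq (ps : List Int) : ∀ (rA : List Int) (out : List Int),
    (ps.foldl (fun st p =>
       let r := solveScan p 1 st.1
       (r.1, st.2 ++ [r.2])) (rA, out)).2
      = (ps.foldl (fun st p =>
       let r := altStep st.1 p
       (r.1, st.2 ++ [r.2])) (condL rA, out)).2 := by
  induction ps with
  | nil => intro rA out; rfl
  | cons p ps ih =>
    intro rA out
    simp only [List.foldl_cons]
    have h := scan_step p rA 1
    have h2 : (solveScan p 1 rA).2 = (altStep (condL rA) p).2 := by
      rw [h.2]; ring
    rw [show ((solveScan p 1 rA).1, out ++ [(solveScan p 1 rA).2])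
          = ((solveScan p 1 rA).1, out ++ [(altStep (condL rA) p).2]) by rw [h2]]
    rw [ih (solveScan p 1 rA).1 (out ++ [(altStep (condL rA) p).2]), h.1]

-- ===== VERDICT (by name: the statement is the Claim_ definition above) =====
theorem solve_spec : Claim_equal_solve := by
  intro rank player _
  unfold Spec_solve solve solve_alt
  rw [buildRuns_eq_cond]
  exact fold_eq player rank []
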